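-- pv_equiv track=rewrite | github.com/stubz151/Advent-Of-code | 2023/day6/day6.py | get_count_second_question
-- ===== SOURCE A (Python) =====
-- def get_count_second_question(arr):
--     count = 0
--     for x in arr:
--         line = x.split(' ')
--         for y in line[0]:
--             if (x.count(y)) == len(line):
--                 count +=1
--     return count
-- ===== SOURCE B (Python) =====
-- def _runs(s):
--     """Run-length encode sorted(s): list of (char, run length) in ascending char order."""
--     chars = sorted(s)
--     runs = []
--     i = 0
--     n = len(chars)
--     while i < n:
--         j = i + 1
--         while j < n and chars[j] == chars[i]:
--             j += 1
--         runs.append((chars[i], j - i))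
--         i = j
--     return runs
--
--
-- def get_count_second_question(arr):
--     total = 0
--     for x in arr:
--         parts = x.split(' ')
--         n = len(parts)
--         full_runs = _runs(x)
--         for ch, m in _runs(parts[0]):
--             if (ch, n) in full_runs:
--                 total += m
--     return total
-- ===== Notes on version B (the rewrite author's own statement) =====
-- stated objective: alternative
-- what changed: Instead of rescanning the line with x.count(y) for every character position of the first token, B sorts the first token and the whole line, run-length encodes both, and for each (char, multiplicity) run of the token adds the multiplicity when the run (char, n) occurs among the line's runs.
import Mathlib
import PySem

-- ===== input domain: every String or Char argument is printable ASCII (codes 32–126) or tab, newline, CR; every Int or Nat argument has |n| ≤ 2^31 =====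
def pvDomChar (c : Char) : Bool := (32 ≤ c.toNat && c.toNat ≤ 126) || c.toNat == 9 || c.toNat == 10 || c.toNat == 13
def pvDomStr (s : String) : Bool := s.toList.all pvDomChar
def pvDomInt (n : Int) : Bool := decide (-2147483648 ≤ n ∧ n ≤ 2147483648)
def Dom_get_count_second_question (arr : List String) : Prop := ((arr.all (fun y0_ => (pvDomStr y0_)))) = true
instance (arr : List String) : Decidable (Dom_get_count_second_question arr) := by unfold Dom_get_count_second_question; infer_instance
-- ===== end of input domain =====

-- B sorts each line and its first token and run-length encodes them, then counts by
-- testing whether the run (ch, n) occurs among the line's runs (alternative algorithm).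

-- ===== PORT A =====
-- split(' ') never returns [], so line[0] is total; ported as headD "".
def get_count_second_question (arr : List String) : Int :=
  arr.foldl (fun count x =>
    let line := (PySem.Str.split? x " ").getD []
    (line.headD "").toList.foldl (fun c y =>
      if PySem.Str.count x (String.ofList [y]) = line.length then c + 1 else c) count) 0

-- ===== PORT B =====
-- _runs of Source B: run-length encoding of the sorted characters — each maximal block of
-- equal characters (found by the inner while loop = takeWhile/dropWhile) becomes one
-- (char, length) pair.
def pvRunsGo : List Char → List (Char × Int)
  | [] => []
  | c :: t =>
      (c, ((t.takeWhile (· == c)).length : Int) + 1) :: pvRunsGo (t.dropWhile (· == c))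
  termination_by l => l.length
  decreasing_by
    exact Nat.lt_succ_of_le (List.length_dropWhile_le _ _)

def pvRuns (s : List Char) : List (Char × Int) :=
  pvRunsGo (PySem.List.sorted s (fun c => c) false)

def get_count_second_question_alt (arr : List String) : Int :=
  arr.foldl (fun total x =>
    let parts := (PySem.Str.split? x " ").getD []
    let n := parts.length
    let fullRuns := pvRuns x.toList
    (pvRuns ((parts.headD "").toList)).foldl
      (fun t p => if (p.1, (n : Int)) ∈ fullRuns then t + p.2 else t) total) 0

-- ===== PRECONDITION & SPEC =====
def Spec_get_count_second_question (arr : List String) (out : Int) : Prop := out = get_count_second_question_alt arr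
instance (arr : List String) (out : Int) : Decidable (Spec_get_count_second_question arr out) := by unfold Spec_get_count_second_question; infer_instance

-- ===== CLAIM (what is proved, stated in full; the proofs are below) =====
def Claim_equal_get_count_second_question : Prop := ∀ (arr : List String), Dom_get_count_second_question arr → Spec_get_count_second_question arr (get_count_second_question arr)

-- ===== LEMMAS AND PROOFS =====

-- Python's str.count of a single character equals the character count of the list.
theorem chars_count_go_singleton (y : Char) :
    ∀ (fuel : Nat) (l : List Char) (acc : Nat), l.length ≤ fuel →
      PySem.Chars.count.go [y] fuel l acc = acc + l.count y := by
  intro fuel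
  induction fuel with
  | zero =>
    intro l acc h
    have : l = [] := List.length_eq_zero_iff.mp (Nat.le_zero.mp h)
    subst this; rfl
  | succ f ih =>
    intro l acc h
    cases l with
    | nil => rfl
    | cons a t =>
      simp only [PySem.Chars.count.go]
      by_cases hya : y = a
      · subst hya
        have hpre : [y].isPrefixOf (y :: t) = true := by simp [List.isPrefixOf]
        rw [if_pos hpre]
        simp only [List.length_cons] at h
        rw [ih _ _ (by simpa using h)]
        simp
        omega
      · have hpre : [y].isPrefixOf (a :: t) = false := by
          simp [List.isPrefixOf, hya]
        rw [hpre]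
        simp only [Bool.false_eq_true, if_false]
        simp only [List.length_cons] at h
        rw [ih _ _ (by omega)]
        simp [Ne.symm hya]

theorem chars_count_singleton (l : List Char) (y : Char) :
    PySem.Chars.count l [y] = l.count y := by
  simp only [PySem.Chars.count, List.isEmpty_cons, Bool.false_eq_true, if_false]
  simpa using chars_count_go_singleton y l.length l 0 (Nat.le_refl _)

-- the split helper never returns the empty list of pieces
theorem splitOn_go_ne_nil (sep : List Char) :
    ∀ (fuel : Nat) (l cur : List Char) (acc : List (List Char)),
      PySem.Chars.splitOn.go sep fuel l cur acc ≠ [] := by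
  intro fuel
  induction fuel with
  | zero => intro l cur acc; rw [PySem.Chars.splitOn.go]; simp
  | succ f ih =>
    intro l cur acc
    cases l with
    | nil => rw [PySem.Chars.splitOn.go]; simp; omega
    | cons c rest =>
      rw [PySem.Chars.splitOn.go]
      by_cases hpre : sep.isPrefixOf (c :: rest) = true
      · rw [if_pos hpre]; exact ih _ _ _
      · rw [if_neg hpre]; exact ih _ _ _

theorem split_space_ne_nil (x : String) :
    (PySem.Str.split? x " ").getD [] ≠ [] := by
  have h : PySem.Str.split? x " "
      = some ((PySem.Chars.splitOn x.toList [' ']).map String.ofList) := by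
    simp [PySem.Str.split?, PySem.Chars.split?]
  rw [h]
  simp only [Option.getD_some]
  intro hc
  exact splitOn_go_ne_nil [' '] _ _ _ _ (List.map_eq_nil_iff.mp hc)

-- countP of a list whose elements are all equal to c
theorem countP_of_all_eq {s : List Char} {c : Char} (p : Char → Bool)
    (h : ∀ x ∈ s, x = c) : s.countP p = if p c then s.length else 0 := by
  induction s with
  | nil => simp
  | cons a t ih =>
    have ha : a = c := h a (by simp)
    subst ha
    rw [List.countP_cons, ih (fun x hx => h x (by simp [hx]))]
    by_cases hp : p a <;> simp [hp]

-- summing the run lengths of the runs whose character satisfies p counts the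
-- characters satisfying p (no sortedness needed: runs partition the list)
theorem runsGo_foldl (p : Char → Prop) [DecidablePred p] :
    ∀ (l : List Char) (acc : Int),
      (pvRunsGo l).foldl (fun t q => if p q.1 then t + q.2 else t) acc
        = acc + (l.countP (fun c => decide (p c)) : Int) := by
  intro l
  induction l using pvRunsGo.induct with
  | case1 => intro acc; simp [pvRunsGo]
  | case2 c t ih =>
    intro acc
    rw [pvRunsGo]
    simp only [List.foldl_cons]
    rw [ih]
    have hsplit : t = t.takeWhile (· == c) ++ t.dropWhile (· == c) :=
      (List.takeWhile_append_dropWhile).symm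
    have ht : t.countP (fun c => decide (p c))
        = (t.takeWhile (· == c)).countP (fun c => decide (p c))
          + (t.dropWhile (· == c)).countP (fun c => decide (p c)) := by
      conv_lhs => rw [hsplit]
      rw [List.countP_append]
    have hcount : (c :: t).countP (fun c => decide (p c))
        = (c :: t.takeWhile (· == c)).countP (fun c => decide (p c))
          + (t.dropWhile (· == c)).countP (fun c => decide (p c)) := by
      simp only [List.countP_cons, ht]
      omega
    have hall : ∀ x ∈ c :: t.takeWhile (· == c), x = c := by
      intro x hx
      rcases List.mem_cons.mp hx with h | h
      · exact h
      · have hb := List.mem_takeWhile_imp h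
        exact eq_of_beq (by simpa using hb)
    rw [hcount, countP_of_all_eq (fun c => decide (p c)) hall]
    by_cases hp : p c <;> simp [hp] <;> push_cast <;> omega

-- on a weakly sorted list, the character c does not reappear after its leading run
theorem not_mem_dropWhile_of_sorted (c : Char) (t : List Char)
    (h : (c :: t).Pairwise (· ≤ ·)) : c ∉ t.dropWhile (· == c) := by
  cases hr : t.dropWhile (· == c) with
  | nil => simp
  | cons d r =>
    have hd : ¬ (d == c) = true := by
      have := List.head_dropWhile_not (· == c) (l := t) (by simp [hr])
      simpa [hr] using this
    have hdc : d ≠ c := by simpa using hd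
    have hsub : (d :: r).Sublist t := hr ▸ List.dropWhile_sublist _
    have hpt : (d :: r).Pairwise (· ≤ ·) := (List.pairwise_cons.mp h).2.sublist hsub
    have hcd : c ≤ d := (List.pairwise_cons.mp h).1 d (hsub.subset (by simp))
    have hlt : c < d := lt_of_le_of_ne hcd (fun he => hdc he.symm)
    intro hmem
    rcases List.mem_cons.mp hmem with h1 | h1
    · exact hdc h1.symm
    · have : d ≤ c := (List.pairwise_cons.mp hpt).1 c h1
      exact absurd (lt_of_lt_of_le hlt this) (lt_irrefl c)

-- characterisation of run membership on a weakly sorted list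
theorem mem_runsGo (ch : Char) (k : Int) :
    ∀ (l : List Char), l.Pairwise (· ≤ ·) →
      ((ch, k) ∈ pvRunsGo l ↔ ch ∈ l ∧ k = (l.count ch : Int)) := by
  intro l
  induction l using pvRunsGo.induct with
  | case1 => intro _; simp [pvRunsGo]
  | case2 c t ih =>
    intro h
    have hsplit : t = t.takeWhile (· == c) ++ t.dropWhile (· == c) :=
      (List.takeWhile_append_dropWhile).symm
    have halls : ∀ x ∈ t.takeWhile (· == c), x = c := by
      intro x hx
      have hb := List.mem_takeWhile_imp hx
      exact eq_of_beq (by simpa using hb)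
    have hnotd : c ∉ t.dropWhile (· == c) := not_mem_dropWhile_of_sorted c t h
    have hpd : (t.dropWhile (· == c)).Pairwise (· ≤ ·) :=
      (List.pairwise_cons.mp h).2.sublist (List.dropWhile_sublist _)
    have ihd := ih hpd
    rw [pvRunsGo]
    by_cases hch : ch = c
    · subst hch
      have hcnt : (ch :: t).count ch = (t.takeWhile (· == ch)).length + 1 := by
        have hs0 : (t.takeWhile (· == ch)).count ch = (t.takeWhile (· == ch)).length :=
          List.count_eq_length.mpr (fun b hb => (halls b hb).symm)
        have hr0 : (t.dropWhile (· == ch)).count ch = 0 := List.count_eq_zero.mpr hnotd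
        have h1 := congrArg (List.count ch) hsplit
        rw [List.count_append, hs0, hr0] at h1
        simp only [List.count_cons_self]
        omega
      constructor
      · intro hmem
        rcases List.mem_cons.mp hmem with h1 | h1
        · refine ⟨by simp, ?_⟩
          have := (Prod.mk.injEq _ _ _ _).mp h1
          rw [this.2, hcnt]; push_cast; ring
        · exact absurd ((ihd.mp h1).1) hnotd
      · intro ⟨_, hk⟩
        rw [hcnt] at hk
        apply List.mem_cons.mpr; left
        rw [hk]; push_cast; ring
    · have hcnt : (c :: t).count ch = (t.dropWhile (· == c)).count ch := by
        have hs0 : (t.takeWhile (· == c)).count ch = 0 :=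
          List.count_eq_zero.mpr (fun hm => hch (halls ch hm))
        have h1 := congrArg (List.count ch) hsplit
        rw [List.count_append, hs0] at h1
        have hne2 : ¬ (c = ch) := fun e => hch e.symm
        simp only [List.count_cons, beq_iff_eq, hne2, if_false]
        omega
      constructor
      · intro hmem
        rcases List.mem_cons.mp hmem with h1 | h1
        · exact absurd ((Prod.mk.injEq _ _ _ _).mp h1).1 hch
        · obtain ⟨hm, hk⟩ := ihd.mp h1
          exact ⟨List.mem_cons.mpr (Or.inr (hsplit ▸ List.mem_append.mpr (Or.inr hm))),
            by rw [hcnt]; exact hk⟩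
      · intro ⟨hm, hk⟩
        apply List.mem_cons.mpr; right
        apply ihd.mpr
        refine ⟨?_, by rw [← hcnt]; exact hk⟩
        rcases List.mem_cons.mp hm with h1 | h1
        · exact absurd h1 hch
        · rcases List.mem_append.mp (hsplit ▸ h1) with h2 | h2
          · exact absurd (halls ch h2) hch
          · exact h2

-- the per-line amounts of the two ports agree
theorem step_eq (x : String) (acc : Int) :
    (let line := (PySem.Str.split? x " ").getD []
     (line.headD "").toList.foldl (fun c y =>
       if PySem.Str.count x (String.ofList [y]) = line.length then c + 1 else c) acc)
    = (let parts := (PySem.Str.split? x " ").getD []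
       let n := parts.length
       let fullRuns := pvRuns x.toList
       (pvRuns ((parts.headD "").toList)).foldl
         (fun t p => if (p.1, (n : Int)) ∈ fullRuns then t + p.2 else t) acc) := by
  simp only []
  set parts := (PySem.Str.split? x " ").getD [] with hparts
  set tok := (parts.headD "").toList with htok
  set n := parts.length with hn
  have hne : parts ≠ [] := split_space_ne_nil x
  have hn1 : 1 ≤ n := by
    cases hp : parts with
    | nil => exact absurd hp hne
    | cons a b => simp [hn, hp]
  -- A side: count of token chars y with x.count(y) = n
  have hA : tok.foldl (fun c y =>
      if PySem.Str.count x (String.ofList [y]) = n then c + 1 else c) acc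
      = acc + (tok.countP (fun y => decide (x.toList.count y = n)) : Int) := by
    rw [PySem.List.foldl_ite_add_one (fun y => PySem.Str.count x (String.ofList [y]) = n)]
    congr 2
    apply List.countP_congr
    intro y _
    simp [PySem.Str.count_eq, chars_count_singleton]
  -- B side: weighted sum over the token's runs = the same countP
  have hsx : (PySem.List.sorted x.toList (fun c => c) false).Pairwise (· ≤ ·) := by
    simpa using PySem.List.sorted_pairwise x.toList (fun c => c)
  have hpx : (PySem.List.sorted x.toList (fun c => c) false).Perm x.toList :=
    PySem.List.sorted_perm x.toList (fun c => c) false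
  have hcond : ∀ y : Char,
      ((y, (n : Int)) ∈ pvRuns x.toList) ↔ x.toList.count y = n := by
    intro y
    unfold pvRuns
    rw [mem_runsGo y (n : Int) _ hsx]
    rw [hpx.count_eq]
    constructor
    · intro ⟨_, hk⟩
      exact_mod_cast hk.symm
    · intro hc
      refine ⟨hpx.mem_iff.mpr (List.count_pos_iff.mp (by omega)), by exact_mod_cast hc.symm⟩
  have hB : (pvRuns tok).foldl
      (fun t p => if (p.1, (n : Int)) ∈ pvRuns x.toList then t + p.2 else t) acc
      = acc + (tok.countP (fun y => decide (x.toList.count y = n)) : Int) := by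
    rw [show pvRuns tok = pvRunsGo (PySem.List.sorted tok (fun c => c) false) from rfl,
        runsGo_foldl (fun y => (y, (n : Int)) ∈ pvRuns x.toList),
        (PySem.List.sorted_perm tok (fun c => c) false).countP_eq]
    congr 2
    apply List.countP_congr
    intro y _
    simpa using hcond y
  rw [hA, ← hB]

-- ===== VERDICT (by name: the statement is the Claim_ definition above) =====
theorem get_count_second_question_spec : Claim_equal_get_count_second_question := by
  intro arr _
  simp only [Spec_get_count_second_question, get_count_second_question, get_count_second_question_alt]
  congr 1
  funext acc x
  exact step_eq x acc
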